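-- pv_equiv track=rewrite | github.com/FyisFe/UCB-CS61A-20Fall | project/cats/cats.py | shifty_shifts
-- ===== SOURCE A (Python) =====
-- def shifty_shifts(start, goal, limit):
--     """A diff function for autocorrect that determines how many letters
--     in START need to be substituted to create GOAL, then adds the difference in
--     their lengths.
--     """
--     # BEGIN PROBLEM 6
--     if limit < 0:
--         return 1
--
--     if not len(goal) or not len(start):
--         return abs(len(start) - len(goal))
--
--     first_char_not_equal = start[0] != goal[0]
--     return first_char_not_equal + shifty_shifts(
--         start[1:], goal[1:], limit - first_char_not_equal
--     )
-- ===== SOURCE B (Python) =====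
-- def shifty_shifts(start, goal, limit):
--     """Single index-free pass over zipped characters instead of slicing recursion."""
--     if limit < 0:
--         return 1
--     subs = 0
--     for a, b in zip(start, goal):
--         if a != b:
--             subs += 1
--             if subs > limit:
--                 return subs + 1
--     return subs + abs(len(start) - len(goal))
-- ===== Notes on version B (the rewrite author's own statement) =====
-- stated objective: faster
-- what changed: Replaces the slicing recursion (each step copies both string tails) with one iterative pass over the zipped characters keeping a mismatch counter and an early return when the counter exceeds the limit.
import Mathlib
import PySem

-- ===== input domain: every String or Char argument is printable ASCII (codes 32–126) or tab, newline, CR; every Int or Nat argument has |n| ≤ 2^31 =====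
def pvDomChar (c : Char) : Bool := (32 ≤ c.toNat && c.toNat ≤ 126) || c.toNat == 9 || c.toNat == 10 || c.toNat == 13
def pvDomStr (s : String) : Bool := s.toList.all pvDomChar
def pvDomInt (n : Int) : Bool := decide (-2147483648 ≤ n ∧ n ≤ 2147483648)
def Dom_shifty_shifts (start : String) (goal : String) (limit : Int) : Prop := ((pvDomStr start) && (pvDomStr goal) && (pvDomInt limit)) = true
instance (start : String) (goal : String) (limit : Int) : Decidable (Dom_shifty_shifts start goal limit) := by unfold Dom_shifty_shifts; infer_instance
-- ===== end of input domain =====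

-- B replaces A's slicing recursion by a single iterative pass over the zipped characters (faster, asymptotic).


-- ===== PORT A =====
-- A's recursion over the two strings (start[1:] / goal[1:] become tails).
def shiftyShiftsRecA : List Char → List Char → Int → Int
  | s, g, limit =>
    if limit < 0 then 1
    else
      match s, g with
      | [], g => |((0 : Int)) - (g.length : Int)|
      | s, [] => |((s.length : Int)) - (0 : Int)|
      | a :: s', b :: g' =>
        let firstCharNotEqual : Int := if a ≠ b then 1 else 0
        firstCharNotEqual + shiftyShiftsRecA s' g' (limit - firstCharNotEqual)

def shifty_shifts (start : String) (goal : String) (limit : Int) : Int :=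
  shiftyShiftsRecA start.toList goal.toList limit

-- ===== PORT B =====
-- B's for-loop over zip(start, goal) with the running mismatch counter and early return.
def shiftyShiftsLoopB : List (Char × Char) → Int → Int → Int → Int
  | [], subs, _, diff => subs + diff
  | (a, b) :: rest, subs, limit, diff =>
    if a ≠ b then
      if subs + 1 > limit then (subs + 1) + 1
      else shiftyShiftsLoopB rest (subs + 1) limit diff
    else shiftyShiftsLoopB rest subs limit diff

def shifty_shifts_alt (start : String) (goal : String) (limit : Int) : Int :=
  if limit < 0 then 1
  else shiftyShiftsLoopB (start.toList.zip goal.toList) 0 limit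
        |((start.toList.length : Int)) - (goal.toList.length : Int)|

-- ===== PRECONDITION & SPEC =====
def Spec_shifty_shifts (start : String) (goal : String) (limit : Int) (out : Int) : Prop := out = shifty_shifts_alt start goal limit
instance (start : String) (goal : String) (limit : Int) (out : Int) : Decidable (Spec_shifty_shifts start goal limit out) := by unfold Spec_shifty_shifts; infer_instance

-- ===== CLAIM (what is proved, stated in full; the proofs are below) =====
def Claim_equal_shifty_shifts : Prop := ∀ (start : String) (goal : String) (limit : Int), Dom_shifty_shifts start goal limit → Spec_shifty_shifts start goal limit (shifty_shifts start goal limit)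

-- ===== LEMMAS AND PROOFS =====

-- Loop invariant: B's loop with accumulator `subs` and limit parameter `subs + limit`
-- computes `subs +` A's recursion, as long as the running limit is still nonnegative.
theorem shiftyShifts_loop_inv (s : List Char) : ∀ (g : List Char) (limit subs : Int),
    0 ≤ limit →
    shiftyShiftsLoopB (s.zip g) subs (subs + limit) |((s.length : Int)) - (g.length : Int)|
      = subs + shiftyShiftsRecA s g limit := by
  induction s with
  | nil =>
    intro g limit subs h
    rw [shiftyShiftsRecA.eq_def]
    simp [shiftyShiftsLoopB, not_lt.mpr h]
  | cons a s' ih =>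
    intro g limit subs h
    cases g with
    | nil =>
      rw [shiftyShiftsRecA.eq_def]
      simp [shiftyShiftsLoopB, not_lt.mpr h]
    | cons b g' =>
      rw [shiftyShiftsRecA.eq_def]
      simp only [List.zip_cons_cons, shiftyShiftsLoopB, if_neg (not_lt.mpr h),
        List.length_cons]
      have hlen : |(((s'.length : Int)) + 1) - (((g'.length : Int)) + 1)|
          = |((s'.length : Int)) - (g'.length : Int)| := by congr 1; ring
      push_cast
      rw [hlen]
      by_cases hab : a = b
      · subst hab
        simp only [ne_eq, not_true_eq_false, if_false]
        simpa using ih g' limit subs h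
      · rw [if_pos (by simpa using hab)]
        simp only [ne_eq, hab, not_false_eq_true, if_true]
        by_cases hl : limit = 0
        · rw [if_pos (by omega)]
          have hrec : shiftyShiftsRecA s' g' (limit - 1) = 1 := by
            rw [shiftyShiftsRecA.eq_def]
            simp [show limit - 1 < 0 by omega]
          rw [hrec]
          ring
        · rw [if_neg (by omega)]
          have harg : subs + limit = (subs + 1) + (limit - 1) := by ring
          rw [harg, ih g' (limit - 1) (subs + 1) (by omega)]
          ring

-- ===== VERDICT (by name: the statement is the Claim_ definition above) =====
theorem shifty_shifts_spec : Claim_equal_shifty_shifts := by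
  intro start goal limit _
  unfold Spec_shifty_shifts shifty_shifts shifty_shifts_alt
  by_cases h : limit < 0
  · rw [shiftyShiftsRecA.eq_def]
    simp [h]
  · rw [if_neg h]
    have := shiftyShifts_loop_inv start.toList goal.toList limit 0 (not_lt.mp h)
    simpa using this.symm
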